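-- pv_equiv track=rewrite | github.com/Anfer410/Finance-Manager | app/services/upload_pipeline.py | _find_data_start
-- ===== SOURCE A (Python) =====
-- def _find_data_start(lines: list[str], sep: str) -> int:
--     """
--     Return the line index where the largest consecutive block of same-width CSV
--     rows begins.  Bank files often have preamble sections with varying column
--     counts; the actual transaction data is the longest consistent block.
--     Blocks with fewer than 2 fields are ignored (single-value summary lines).
--     Returns 0 if no clear block is found.
--     """
--     # Collect (original_line_index, field_count) for every non-empty line
--     counted = [
--         (i, len(line.strip().split(sep)))
--         for i, line in enumerate(lines)
--         if line.strip()
--     ]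
--     if not counted:
--         return 0
--
--     best_start = 0
--     best_len   = 0
--     run_start  = 0
--     run_cnt    = counted[0][1]
--     run_len    = 1
--
--     for k in range(1, len(counted)):
--         _, cnt = counted[k]
--         if cnt == run_cnt:
--             run_len += 1
--         else:
--             if run_cnt >= 2 and run_len > best_len:
--                 best_len  = run_len
--                 best_start = counted[run_start][0]
--             run_start = k
--             run_cnt   = cnt
--             run_len   = 1
--
--     # Check the final run
--     if run_cnt >= 2 and run_len > best_len:
--         best_start = counted[run_start][0]
--
--     return best_start
-- ===== SOURCE B (Python) =====
-- def _find_data_start(lines: list[str], sep: str) -> int: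
--     counted = [
--         (i, len(line.strip().split(sep)))
--         for i, line in enumerate(lines)
--         if line.strip()
--     ]
--     groups = _chunk(counted)
--     qual = [(len(g), g[0][0]) for g in groups if g[0][1] >= 2]
--     if not qual:
--         return 0
--     return max(qual, key=lambda r: r[0])[1]
--
--
-- def _chunk(items):
--     """Split into maximal consecutive runs of equal field count."""
--     groups = []
--     while items:
--         c = items[0][1]
--         j = 1
--         while j < len(items) and items[j][1] == c:
--             j += 1
--         groups.append(items[:j])
--         items = items[j:]
--     return groups
-- ===== Notes on version B (the rewrite author's own statement) =====
-- stated objective: alternative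
-- what changed: B materializes the maximal equal-field-count groups explicitly by recursive chunking of the counted list, then filters them and selects the longest with max(key=len), instead of A's single-pass state machine that tracks run/best indices and flushes on boundaries.
-- outside the precondition, e.g. on _find_data_start(['a,b', 'x'], ''): A raises ValueError, B raises ValueError
import Mathlib
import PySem

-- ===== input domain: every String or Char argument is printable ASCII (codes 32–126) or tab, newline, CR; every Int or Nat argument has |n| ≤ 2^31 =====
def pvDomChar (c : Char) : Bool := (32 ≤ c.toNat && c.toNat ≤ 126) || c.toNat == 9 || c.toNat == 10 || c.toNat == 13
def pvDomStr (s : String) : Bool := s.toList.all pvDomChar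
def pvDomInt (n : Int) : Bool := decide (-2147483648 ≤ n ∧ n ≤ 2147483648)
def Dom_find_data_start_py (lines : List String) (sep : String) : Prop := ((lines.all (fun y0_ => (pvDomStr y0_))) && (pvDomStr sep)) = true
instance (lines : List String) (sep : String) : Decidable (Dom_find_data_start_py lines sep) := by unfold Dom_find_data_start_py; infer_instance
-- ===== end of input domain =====

-- B rebuilds the answer from an explicit list of maximal equal-width groups (recursive chunking, then
-- filter + max with key) instead of A's one-pass run/best state machine; objective: alternative (same cost).

-- ===== PORT A =====
-- A-side helpers: the counted comprehension, the loop body and the final-run check, verbatim from A.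
def pvCountedA (lines : List String) (sep : String) : List (Int × Int) :=
  ((PySem.List.enumerate lines 0).filter (fun p => PySem.Str.strip p.2 != "")).map
    (fun p => (p.1, (((PySem.Str.split? (PySem.Str.strip p.2) sep).getD []).length : Int)))

def pvStepA (counted : List (Int × Int)) (st : Int × Int × Int × Int × Int) (k : Int) :
    Int × Int × Int × Int × Int :=
  let (bs, bl, rs, rc, rl) := st
  let cnt := (PySem.List.pyGetD counted k (0, 0)).2
  if cnt = rc then (bs, bl, rs, rc, rl + 1)
  else if 2 ≤ rc ∧ bl < rl then ((PySem.List.pyGetD counted rs (0, 0)).1, rl, k, cnt, 1)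
  else (bs, bl, k, cnt, 1)

def pvFinishA (counted : List (Int × Int)) (st : Int × Int × Int × Int × Int) : Int :=
  let (bs, bl, rs, rc, rl) := st
  if 2 ≤ rc ∧ bl < rl then (PySem.List.pyGetD counted rs (0, 0)).1 else bs

def find_data_start_py (lines : List String) (sep : String) : Int :=
  let counted := pvCountedA lines sep
  if counted = [] then 0
  else
    pvFinishA counted
      ((PySem.List.pyRange 1 (counted.length : Int)).foldl (pvStepA counted)
        (0, 0, 0, (PySem.List.pyGetD counted 0 (0, 0)).2, 1))

-- ===== PORT B =====
-- B-side helpers: same counted comprehension; _chunk's inner while loop (pvRunExtB) and recursion (pvChunkB).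
def pvCountedB (lines : List String) (sep : String) : List (Int × Int) :=
  ((PySem.List.enumerate lines 0).filter (fun p => PySem.Str.strip p.2 != "")).map
    (fun p => (p.1, (((PySem.Str.split? (PySem.Str.strip p.2) sep).getD []).length : Int)))

-- the 'while j < len(items) and items[j][1] == c: j += 1' loop, as steps past position 0
def pvRunExtB (c : Int) : List (Int × Int) → Nat
  | [] => 0
  | x :: t => if x.2 = c then pvRunExtB c t + 1 else 0

def pvChunkB : List (Int × Int) → List (List (Int × Int))
  | [] => []
  | h :: t =>
    let j := pvRunExtB h.2 t + 1
    ((h :: t).take j) :: pvChunkB ((h :: t).drop j)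
termination_by l => l.length
decreasing_by
  simp [List.length_drop]

def find_data_start_py_alt (lines : List String) (sep : String) : Int :=
  let counted := pvCountedB lines sep
  let groups := pvChunkB counted
  let qual := groups.filterMap (fun g =>
    if 2 ≤ (g.headD (0, 0)).2 then some ((g.length : Int), (g.headD (0, 0)).1) else none)
  match PySem.List.max? qual (fun r => r.1) with
  | none => 0
  | some m => m.2

-- ===== PRECONDITION & SPEC =====
-- Pre_ excludes exactly the inputs where A raises: sep = "" while some line is non-blank makes
-- str.split("") raise ValueError (with every line blank the split is never evaluated and A returns 0).
def Pre_find_data_start_py (lines : List String) (sep : String) : Prop :=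
  sep ≠ "" ∨ ∀ l ∈ lines, PySem.Str.strip l = ""
instance (lines : List String) (sep : String) : Decidable (Pre_find_data_start_py lines sep) := by
  unfold Pre_find_data_start_py; infer_instance

def pvWitness_find_data_start_py : List String × String :=
  (["preamble", "a,b", "1,2", "3,4"], ",")

def Spec_find_data_start_py (lines : List String) (sep : String) (out : Int) : Prop :=
  out = find_data_start_py_alt lines sep
instance (lines : List String) (sep : String) (out : Int) :
    Decidable (Spec_find_data_start_py lines sep out) := by
  unfold Spec_find_data_start_py; infer_instance

-- ===== CLAIM (what is proved, stated in full; the proofs are below) =====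
def Claim_equal_find_data_start_py : Prop :=
  ∀ (lines : List String) (sep : String), Dom_find_data_start_py lines sep →
    Pre_find_data_start_py lines sep →
    Spec_find_data_start_py lines sep (find_data_start_py lines sep)

-- ===== LEMMAS AND PROOFS =====

lemma pvRunExtB_le (c : Int) (t : List (Int × Int)) : pvRunExtB c t ≤ t.length := by
  induction t with
  | nil => simp [pvRunExtB]
  | cons x t ih =>
    by_cases h : x.2 = c
    · simp only [pvRunExtB, if_pos h, List.length_cons]; omega
    · simp only [pvRunExtB, if_neg h]; omega


-- the run-level state machine A's loop implements (current run carried as value/count/length)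
def pvSpecCont (bs bl v c rl : Int) : List (Int × Int) → Int
  | [] => if 2 ≤ c ∧ bl < rl then v else bs
  | x :: t =>
    if x.2 = c then pvSpecCont bs bl v c (rl + 1) t
    else if 2 ≤ c ∧ bl < rl then pvSpecCont v rl x.1 x.2 1 t
    else pvSpecCont bs bl x.1 x.2 1 t

-- best-run selection over (length, start, count) triples
def pvSpec2 (bs bl : Int) : List (Int × Int × Int) → Int
  | [] => bs
  | r :: rs => if 2 ≤ r.2.2 ∧ bl < r.1 then pvSpec2 r.2.1 r.1 rs else pvSpec2 bs bl rs

def pvTriple (g : List (Int × Int)) : Int × Int × Int :=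
  ((g.length : Int), (g.headD (0, 0)).1, (g.headD (0, 0)).2)

def pvRunsOf (l : List (Int × Int)) : List (Int × Int × Int) := (pvChunkB l).map pvTriple

def pvMaxStep (acc : Option (Int × Int)) (x : Int × Int) : Option (Int × Int) :=
  match acc with
  | none => some x
  | some m => if m.1 < x.1 then some x else some m

def pvQual (runs : List (Int × Int × Int)) : List (Int × Int) :=
  runs.filterMap (fun r => if 2 ≤ r.2.2 then some (r.1, r.2.1) else none)

lemma pvChunkB_cons (h : Int × Int) (t : List (Int × Int)) :
    pvChunkB (h :: t) = ((h :: t).take (pvRunExtB h.2 t + 1)) :: pvChunkB (t.drop (pvRunExtB h.2 t)) := by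
  rw [pvChunkB]; rfl

lemma pvRunsOf_cons (h : Int × Int) (t : List (Int × Int)) :
    pvRunsOf (h :: t)
      = (((pvRunExtB h.2 t : Int) + 1), h.1, h.2) :: pvRunsOf (t.drop (pvRunExtB h.2 t)) := by
  have hle := pvRunExtB_le h.2 t
  rw [pvRunsOf, pvChunkB_cons]
  simp only [List.map_cons, pvTriple]
  rw [← pvRunsOf]
  congr 2
  · simp [List.length_take]; omega

lemma loopA_spec (l : List (Int × Int)) (n : Nat) :
    ∀ (k : Nat) (bs bl rc rl rs v : Int),
    n = l.length - k → k ≤ l.length → (PySem.List.pyGetD l rs (0, 0)).1 = v →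
    pvFinishA l (((PySem.List.pyRange (k : Int) (l.length : Int)).foldl (pvStepA l)
        (bs, bl, rs, rc, rl)))
      = pvSpecCont bs bl v rc rl (l.drop k) := by
  induction n with
  | zero =>
    intro k bs bl rc rl rs v hn hk hv
    have hk' : k = l.length := by omega
    subst hk'
    rw [PySem.List.pyRange_one_eq_nil (le_refl _)]
    simp only [List.foldl_nil, List.drop_length]
    simp only [pvFinishA, pvSpecCont, hv]
  | succ n ih =>
    intro k bs bl rc rl rs v hn hk hv
    have hlt : k < l.length := by omega
    have hlt' : (k : Int) < (l.length : Int) := by exact_mod_cast hlt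
    rw [PySem.List.pyRange_one_cons hlt']
    rw [List.foldl_cons]
    have hcast : (k : Int) + 1 = ((k + 1 : Nat) : Int) := by push_cast; ring
    have hget : PySem.List.pyGetD l (k : Int) (0, 0) = l[k] := by
      rw [PySem.List.pyGetD_eq_getElem l (0,0) (by positivity) hlt']
      simp
    have hdrop : l.drop k = l[k] :: l.drop (k + 1) := List.drop_eq_getElem_cons hlt
    rw [hcast, hdrop]
    simp only [pvStepA, hget]
    by_cases hx : l[k].2 = rc
    · rw [if_pos hx]
      rw [ih (k+1) bs bl rc (rl+1) rs v (by omega) (by omega) hv]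
      rw [pvSpecCont, if_pos hx]
    · rw [if_neg hx]
      have hvk : (PySem.List.pyGetD l ((k : Nat) : Int) (0, 0)).1 = l[k].1 := by rw [hget]
      by_cases hc : 2 ≤ rc ∧ bl < rl
      · rw [if_pos hc, hv]
        rw [ih (k+1) v rl l[k].2 1 (k : Int) l[k].1 (by omega) (by omega) hvk]
        rw [pvSpecCont, if_neg hx, if_pos hc]
      · rw [if_neg hc]
        rw [ih (k+1) bs bl l[k].2 1 (k : Int) l[k].1 (by omega) (by omega) hvk]
        rw [pvSpecCont, if_neg hx, if_neg hc]

lemma specCont_runs (t : List (Int × Int)) :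
    ∀ (bs bl v c rl : Int),
    pvSpecCont bs bl v c rl t
      = pvSpec2 bs bl ((rl + (pvRunExtB c t : Int), v, c) :: pvRunsOf (t.drop (pvRunExtB c t))) := by
  induction t with
  | nil =>
    intro bs bl v c rl
    simp only [pvRunExtB, pvSpecCont, pvRunsOf, pvChunkB, List.drop_nil, List.map_nil]
    simp [pvSpec2]
  | cons x t ih =>
    intro bs bl v c rl
    by_cases hx : x.2 = c
    · simp only [pvSpecCont, hx, if_pos, pvRunExtB]
      rw [ih]
      have h1 : rl + 1 + (pvRunExtB c t : Int) = rl + ((pvRunExtB c t + 1 : Nat) : Int) := by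
        push_cast; ring
      rw [h1]
      have h2 : (x :: t).drop (pvRunExtB c t + 1) = t.drop (pvRunExtB c t) := by
        simp [List.drop_succ_cons]
      rw [h2]
    · have h0 : pvRunExtB c (x :: t) = 0 := by simp [pvRunExtB, hx]
      rw [h0]
      simp only [Nat.cast_zero, add_zero, List.drop_zero]
      rw [pvSpecCont, if_neg hx, pvSpec2]
      simp only
      rw [pvRunsOf_cons x t]
      have hcomm : (1 : Int) + (pvRunExtB x.2 t : Int) = (pvRunExtB x.2 t : Int) + 1 := by ring
      split_ifs with hc <;> rw [ih, hcomm]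

lemma maxfold_some (q : List (Int × Int)) :
    ∀ (m : Int × Int),
    q.foldl pvMaxStep (some m)
      = some (match q.foldl pvMaxStep none with
              | none => m
              | some m' => if m.1 < m'.1 then m' else m) := by
  induction q with
  | nil => intro m; rfl
  | cons x q ih =>
    intro m
    have hx := ih x
    have hm := ih (if m.1 < x.1 then x else m)
    simp only [List.foldl_cons, pvMaxStep] at *
    rw [← apply_ite some (m.1 < x.1) x m, hm, hx]
    rcases hq : q.foldl pvMaxStep none with _ | m' <;>
      simp only <;> split_ifs <;> first | rfl | (exfalso; omega)

lemma max2spec (runs : List (Int × Int × Int)) :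
    ∀ (bs bl : Int),
    pvSpec2 bs bl runs
      = (match (pvQual runs).foldl pvMaxStep none with
         | none => bs
         | some m => if bl < m.1 then m.2 else bs) := by
  induction runs with
  | nil => intro bs bl; rfl
  | cons r rest ih =>
    intro bs bl
    by_cases h2 : 2 ≤ r.2.2
    · have hq : pvQual (r :: rest) = (r.1, r.2.1) :: pvQual rest := by
        simp [pvQual, h2]
      rw [hq]
      simp only [List.foldl_cons, pvMaxStep]
      rw [maxfold_some]
      rcases hM : (pvQual rest).foldl pvMaxStep none with _ | m' <;>
        (simp only [pvSpec2, h2, true_and];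
         rw [ih r.2.1 r.1, ih bs bl, hM];
         try simp only
         try rfl
         try (split_ifs <;> first | rfl | (exfalso; omega)))

    · have hq : pvQual (r :: rest) = pvQual rest := by simp [pvQual, h2]
      simp only [pvSpec2, h2, false_and, if_false]
      rw [hq, ih]

lemma runsOf_pos (l : List (Int × Int)) :
    ∀ r ∈ pvRunsOf l, 1 ≤ r.1 := by
  induction l using pvChunkB.induct with
  | case1 => simp [pvRunsOf, pvChunkB]
  | case2 h t j ih =>
    intro r hr
    rw [pvRunsOf_cons] at hr
    rcases List.mem_cons.mp hr with h1 | h2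
    · rw [h1]; simp
    · exact ih r (by simpa [List.drop_succ_cons] using h2)

lemma max?_eq_fold (q : List (Int × Int)) :
    PySem.List.max? q (fun r => r.1) = q.foldl pvMaxStep none := by
  rw [PySem.List.max?]
  congr 1
  funext acc x
  cases acc <;> rfl

lemma portA_eq (lines : List String) (sep : String) :
    find_data_start_py lines sep = pvSpec2 0 0 (pvRunsOf (pvCountedA lines sep)) := by
  unfold find_data_start_py
  rcases hl : pvCountedA lines sep with _ | ⟨h, t⟩
  · simp [pvRunsOf, pvChunkB, pvSpec2]
  · simp only
    rw [if_neg (by simp)]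
    have hget0 : PySem.List.pyGetD (h :: t) 0 (0, 0) = h := by
      have := PySem.List.pyGetD_natCast (h :: t) 0 (0, 0)
      simp only [Nat.cast_zero] at this
      simpa using this
    have H := loopA_spec (h :: t) ((h :: t).length - 1) 1 0 0
          (PySem.List.pyGetD (h :: t) 0 (0, 0)).2 1 0 (PySem.List.pyGetD (h :: t) 0 (0, 0)).1
          rfl (by simp) rfl
    rw [Nat.cast_one] at H
    rw [H]
    rw [hget0]
    simp only [List.drop_one, List.tail_cons]
    rw [specCont_runs]
    rw [pvRunsOf_cons]
    have hcomm : (1 : Int) + (pvRunExtB h.2 t : Int) = (pvRunExtB h.2 t : Int) + 1 := by ring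
    rw [hcomm]

lemma portB_eq (lines : List String) (sep : String) :
    find_data_start_py_alt lines sep = pvSpec2 0 0 (pvRunsOf (pvCountedB lines sep)) := by
  unfold find_data_start_py_alt
  have hqual : (pvChunkB (pvCountedB lines sep)).filterMap (fun g =>
      if 2 ≤ (g.headD (0, 0)).2 then some ((g.length : Int), (g.headD (0, 0)).1) else none)
      = pvQual (pvRunsOf (pvCountedB lines sep)) := by
    rw [pvQual, pvRunsOf, List.filterMap_map]
    rfl
  rw [max2spec]
  simp only [hqual, max?_eq_fold]
  rcases hF : (pvQual (pvRunsOf (pvCountedB lines sep))).foldl pvMaxStep none with _ | m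
  · rfl
  · simp only
    have hmem : m ∈ pvQual (pvRunsOf (pvCountedB lines sep)) :=
      PySem.List.max?_mem (by rw [max?_eq_fold, hF])
    rw [pvQual] at hmem
    rcases List.mem_filterMap.mp hmem with ⟨r, hr, hfr⟩
    have h1 : 1 ≤ m.1 := by
      by_cases h2 : 2 ≤ r.2.2
      · rw [if_pos h2, Option.some_inj] at hfr
        have := runsOf_pos _ r hr
        rw [← hfr]
        exact this
      · rw [if_neg h2] at hfr; exact absurd hfr (by simp)
    rw [if_pos (by omega)]

-- ===== VERDICT (by name: the statement is the Claim_ definition above) =====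
theorem find_data_start_py_spec : Claim_equal_find_data_start_py := by
  intro lines sep _ _
  unfold Spec_find_data_start_py
  rw [portA_eq, portB_eq]
  rfl
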